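-- pv_equiv track=rewrite | github.com/djnhngocduc/P-Center | encoder2.py | _partition_O_sets_single
-- ===== SOURCE A (Python) =====
-- def _partition_O_sets_single(adj, active, v):
--     def N(u: int):
--         return adj[u] & active
--     """For Rule 1: O-sets wrt N'(v) on G_R."""
--     Nv = N(v)             # N'(v)
--     Nclosed = Nv | {v}            # N'[v]
--
--     O1 = {u for u in Nv if any((w not in Nclosed) for w in N(u))}
--
--     O2 = set()
--     for u in Nv:
--         if u in O1:
--             continue
--         Nu = N(u)
--         if any((x in O1) for x in Nu) and all((x in Nclosed) for x in Nu):
--             O2.add(u)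
--     O3 = Nv - O1 - O2
--     return O1, O2, O3
-- ===== SOURCE B (Python) =====
-- def _partition_O_sets_single(adj, active, v):
--     """Classify each neighbor locally by a pure predicate instead of staged
--     global set constructions: a vertex is O1 iff its own active neighborhood
--     escapes N'[v], O2 iff it touches some escaping neighbor in N'(v), else O3."""
--     Nv = adj[v] & active
--     Ncl = Nv | {v}
--
--     def escapes(u):
--         # u's active neighborhood leaves the closed neighborhood N'[v]
--         return not (adj[u] & active <= Ncl)
--
--     O1, O2, O3 = set(), set(), set()
--     for u in Nv:
--         Nu = adj[u] & active
--         if not (Nu <= Ncl):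
--             O1.add(u)
--         elif any(x in Nv and escapes(x) for x in Nu):
--             O2.add(u)
--         else:
--             O3.add(u)
--     return O1, O2, O3
-- ===== Notes on version B (the rewrite author's own statement) =====
-- stated objective: alternative
-- what changed: B replaces A's staged global construction (build the set O1, then rescan every remaining candidate testing membership in O1 and containment in Nclosed, then set-subtract for O3) by a single loop that classifies each neighbor with a local pure predicate escapes(u), re-deriving O1-membership of neighbors on the fly and dropping the redundant Nclosed containment test; no intermediate O-set is ever consulted.
import Mathlib
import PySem

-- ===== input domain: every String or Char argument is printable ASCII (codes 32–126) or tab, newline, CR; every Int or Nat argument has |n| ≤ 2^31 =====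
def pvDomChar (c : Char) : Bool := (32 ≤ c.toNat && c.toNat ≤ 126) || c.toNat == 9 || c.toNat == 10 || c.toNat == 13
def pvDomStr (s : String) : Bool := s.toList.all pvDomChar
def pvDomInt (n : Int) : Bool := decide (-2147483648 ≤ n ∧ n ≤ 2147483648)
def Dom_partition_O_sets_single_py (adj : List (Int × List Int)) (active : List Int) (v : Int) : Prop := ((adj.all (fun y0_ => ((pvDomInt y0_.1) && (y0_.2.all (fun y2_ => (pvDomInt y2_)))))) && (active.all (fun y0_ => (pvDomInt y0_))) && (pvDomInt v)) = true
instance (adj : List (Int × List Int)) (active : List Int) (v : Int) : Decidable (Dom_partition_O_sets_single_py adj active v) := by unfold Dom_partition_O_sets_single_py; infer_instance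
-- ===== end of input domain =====

-- B classifies each neighbor of v in ONE loop by a local predicate escapes(u) (no intermediate
-- O-set is built or consulted; the redundant Nclosed containment test of A's O2 pass is dropped);
-- equal return values on Pre_ (where Python A returns instead of raising KeyError).


-- ===== PORT A =====
-- A's nested helper N(u) = adj[u] & active (totalized with []; Pre_ keeps us where Python returns)
def pvN (adj : List (Int × List Int)) (active : List Int) (u : Int) : List Int :=
  PySem.Set.inter (PySem.Set.ofList (((PySem.Dict.mk adj).get? u).getD [])) active

def partition_O_sets_single_py (adj : List (Int × List Int)) (active : List Int) (v : Int) : List Int × List Int × List Int :=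
  let Nv := pvN adj active v
  let Nclosed := PySem.Set.union Nv [v]
  let O1 := Nv.foldl (fun s u =>
      if (pvN adj active u).any (fun w => !(PySem.Set.contains Nclosed w)) then PySem.Set.add s u else s)
    PySem.Set.empty
  let O2 := Nv.foldl (fun s u =>
      if PySem.Set.contains O1 u then s
      else
        let Nu := pvN adj active u
        if (Nu.any fun x => PySem.Set.contains O1 x) && (Nu.all fun x => PySem.Set.contains Nclosed x) then
          PySem.Set.add s u
        else s)
    PySem.Set.empty
  let O3 := PySem.Set.diff (PySem.Set.diff Nv O1) O2
  (O1, O2, O3)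

-- ===== PORT B =====
-- B's local predicate escapes(u): u's active neighborhood leaves the closed neighborhood
def pvEscapes (adj : List (Int × List Int)) (active : List Int) (Ncl : List Int) (u : Int) : Bool :=
  !(PySem.Set.issubset (pvN adj active u) Ncl)

def partition_O_sets_single_py_alt (adj : List (Int × List Int)) (active : List Int) (v : Int) : List Int × List Int × List Int :=
  let Nv := pvN adj active v
  let Ncl := PySem.Set.union Nv [v]
  Nv.foldl (fun acc u =>
      let Nu := pvN adj active u
      if !(PySem.Set.issubset Nu Ncl) then (PySem.Set.add acc.1 u, acc.2.1, acc.2.2)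
      else if Nu.any (fun x => PySem.Set.contains Nv x && pvEscapes adj active Ncl x) then
        (acc.1, PySem.Set.add acc.2.1 u, acc.2.2)
      else (acc.1, acc.2.1, PySem.Set.add acc.2.2 u))
    (PySem.Set.empty, PySem.Set.empty, PySem.Set.empty)

-- ===== PRECONDITION & SPEC =====
-- Pre_ excludes exactly the inputs where Python A raises KeyError: v (or some active neighbor
-- u of v) is not a key of adj.
def Pre_partition_O_sets_single_py (adj : List (Int × List Int)) (active : List Int) (v : Int) : Prop :=
  ((PySem.Dict.mk adj).get? v).isSome = true ∧
  ∀ u ∈ PySem.Set.inter (PySem.Set.ofList (((PySem.Dict.mk adj).get? v).getD [])) active,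
    ((PySem.Dict.mk adj).get? u).isSome = true
instance (adj : List (Int × List Int)) (active : List Int) (v : Int) : Decidable (Pre_partition_O_sets_single_py adj active v) := by unfold Pre_partition_O_sets_single_py; infer_instance

def pvWitness_partition_O_sets_single_py : (List (Int × List Int)) × List Int × Int :=
  ([(0, [1, 2]), (1, [0]), (2, [0, 1])], [0, 1, 2], 0)

def Spec_partition_O_sets_single_py (adj : List (Int × List Int)) (active : List Int) (v : Int) (out : List Int × List Int × List Int) : Prop := out = partition_O_sets_single_py_alt adj active v
instance (adj : List (Int × List Int)) (active : List Int) (v : Int) (out : List Int × List Int × List Int) : Decidable (Spec_partition_O_sets_single_py adj active v out) := by unfold Spec_partition_O_sets_single_py; infer_instance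

-- ===== CLAIM (what is proved, stated in full; the proofs are below) =====
def Claim_equal_partition_O_sets_single_py : Prop := ∀ (adj : List (Int × List Int)) (active : List Int) (v : Int), Dom_partition_O_sets_single_py adj active v → Pre_partition_O_sets_single_py adj active v → Spec_partition_O_sets_single_py adj active v (partition_O_sets_single_py adj active v)

-- ===== LEMMAS AND PROOFS =====

-- a fold that conditionally adds fresh elements (set-comprehension build) is a filter
theorem pv_foldl_add_filter (p : Int → Bool) (l s0 : List Int) (hn : l.Nodup)
    (hd : ∀ u ∈ l, u ∉ s0) :
    l.foldl (fun s u => if p u then PySem.Set.add s u else s) s0 = s0 ++ l.filter p := by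
  induction l generalizing s0 with
  | nil => simp
  | cons x t ih =>
    have hadd : PySem.Set.add s0 x = s0 ++ [x] := PySem.Set.add_of_not_mem (hd x (by simp))
    by_cases hp : p x = true
    · have := ih (s0 ++ [x]) hn.of_cons (by
        intro u hu
        simp only [List.mem_append, List.mem_singleton]
        rintro (h | rfl)
        · exact hd u (by simp [hu]) h
        · exact (List.nodup_cons.mp hn).1 hu)
      simp [hp, hadd, this, List.append_assoc]
    · have := ih s0 hn.of_cons (fun u hu => hd u (by simp [hu]))
      simp [hp, this]

-- B's single three-way classifying loop builds the three filters of Nv at once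
theorem pv_foldl_threeway (p1 p2 : Int → Bool) (l a b c : List Int) (hn : l.Nodup)
    (ha : ∀ u ∈ l, u ∉ a) (hb : ∀ u ∈ l, u ∉ b) (hc : ∀ u ∈ l, u ∉ c) :
    l.foldl (fun acc u =>
        if p1 u then (PySem.Set.add acc.1 u, acc.2.1, acc.2.2)
        else if p2 u then (acc.1, PySem.Set.add acc.2.1 u, acc.2.2)
        else (acc.1, acc.2.1, PySem.Set.add acc.2.2 u)) (a, b, c)
      = (a ++ l.filter p1, b ++ l.filter (fun u => !p1 u && p2 u),
         c ++ l.filter (fun u => !p1 u && !p2 u)) := by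
  induction l generalizing a b c with
  | nil => simp
  | cons x t ih =>
    have hfresh : ∀ s : List Int, x ∉ s → PySem.Set.add s x = s ++ [x] :=
      fun s h => PySem.Set.add_of_not_mem h
    have hxt := (List.nodup_cons.mp hn).1
    have ha' : ∀ u ∈ t, u ∉ a := fun u hu => ha u (by simp [hu])
    have hb' : ∀ u ∈ t, u ∉ b := fun u hu => hb u (by simp [hu])
    have hc' : ∀ u ∈ t, u ∉ c := fun u hu => hc u (by simp [hu])
    have hext : ∀ (s : List Int), (∀ u ∈ t, u ∉ s) → ∀ u ∈ t, u ∉ s ++ [x] := by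
      intro s hs u hu
      simp only [List.mem_append, List.mem_singleton]
      rintro (h | rfl)
      · exact hs u hu h
      · exact hxt hu
    by_cases h1 : p1 x = true
    · have := ih (a ++ [x]) b c hn.of_cons (hext a ha') hb' hc'
      simp [h1, hfresh a (ha x (by simp)), this, List.append_assoc]
    · by_cases h2 : p2 x = true
      · have := ih a (b ++ [x]) c hn.of_cons ha' (hext b hb') hc'
        simp [h1, h2, hfresh b (hb x (by simp)), this, List.append_assoc]
      · have := ih a b (c ++ [x]) hn.of_cons ha' hb' (hext c hc')
        simp [h1, h2, hfresh c (hc x (by simp)), this, List.append_assoc]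

-- Python set truthiness bridges on membership
theorem pv_contains_filter (p : Int → Bool) (l : List Int) (x : Int) :
    PySem.Set.contains (l.filter p) x = (PySem.Set.contains l x && p x) := by
  rw [Bool.eq_iff_iff]
  simp [List.mem_filter]

-- s <= t is an all-scan
theorem pv_subset_all (s t : List Int) :
    PySem.Set.issubset s t = s.all (fun w => PySem.Set.contains t w) := by
  rw [Bool.eq_iff_iff, PySem.Set.issubset_iff]
  simp [List.all_eq_true]

-- not (s <= t) is an any-scan for an element outside t
theorem pv_not_subset_any (s t : List Int) :
    (!(PySem.Set.issubset s t)) = s.any (fun w => !(PySem.Set.contains t w)) := by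
  rw [Bool.eq_iff_iff, Bool.not_eq_true', Bool.eq_false_iff, Ne, PySem.Set.issubset_iff]
  simp [List.any_eq_true, not_forall]

-- ===== VERDICT (by name: the statement is the Claim_ definition above) =====
theorem partition_O_sets_single_py_spec : Claim_equal_partition_O_sets_single_py := by
  intro adj active v _ _
  unfold Spec_partition_O_sets_single_py
  show partition_O_sets_single_py adj active v = partition_O_sets_single_py_alt adj active v
  simp only [partition_O_sets_single_py, partition_O_sets_single_py_alt]
  set Nv := pvN adj active v with hNv
  set Ncl := PySem.Set.union Nv [v] with hNcl
  have hnodup : Nv.Nodup := PySem.Set.nodup_inter _ active (PySem.Set.nodup_ofList _)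
  have hempty : ∀ u ∈ Nv, u ∉ (PySem.Set.empty : List Int) := by
    intro u _ h; simp [PySem.Set.empty] at h
  -- A's O1 comprehension is the escapes-filter of Nv
  have hO1 : List.foldl (fun s u => if ((pvN adj active u).any fun w => !PySem.Set.contains Ncl w) = true then PySem.Set.add s u else s) PySem.Set.empty Nv
      = Nv.filter (fun u => !PySem.Set.issubset (pvN adj active u) Ncl) := by
    rw [pv_foldl_add_filter (fun u => (pvN adj active u).any fun w => !PySem.Set.contains Ncl w) Nv PySem.Set.empty hnodup hempty]
    rw [show (PySem.Set.empty : List Int) = [] from rfl, List.nil_append]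
    exact List.filter_congr fun u _ => (pv_not_subset_any _ _).symm
  rw [hO1]
  -- A's O2 loop: skip-branch folded into one condition, then it is a filter too
  have hstep : (fun (s : PySem.Set Int) (u : Int) =>
      if PySem.Set.contains (List.filter (fun u => !PySem.Set.issubset (pvN adj active u) Ncl) Nv) u = true then s
      else if (((pvN adj active u).any fun x => PySem.Set.contains (List.filter (fun u => !PySem.Set.issubset (pvN adj active u) Ncl) Nv) x) && (pvN adj active u).all fun x => PySem.Set.contains Ncl x) = true then PySem.Set.add s u else s)
    = (fun (s : PySem.Set Int) (u : Int) =>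
      if ((!PySem.Set.contains (List.filter (fun u => !PySem.Set.issubset (pvN adj active u) Ncl) Nv) u) && (((pvN adj active u).any fun x => PySem.Set.contains (List.filter (fun u => !PySem.Set.issubset (pvN adj active u) Ncl) Nv) x) && (pvN adj active u).all fun x => PySem.Set.contains Ncl x)) = true then PySem.Set.add s u else s) := by
    funext s u
    cases h : PySem.Set.contains (List.filter (fun u => !PySem.Set.issubset (pvN adj active u) Ncl) Nv) u <;> simp
  rw [hstep]
  have hO2 : List.foldl (fun (s : PySem.Set Int) (u : Int) =>
      if ((!PySem.Set.contains (List.filter (fun u => !PySem.Set.issubset (pvN adj active u) Ncl) Nv) u) && (((pvN adj active u).any fun x => PySem.Set.contains (List.filter (fun u => !PySem.Set.issubset (pvN adj active u) Ncl) Nv) x) && (pvN adj active u).all fun x => PySem.Set.contains Ncl x)) = true then PySem.Set.add s u else s) PySem.Set.empty Nv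
      = List.filter (fun u => (!(!PySem.Set.issubset (pvN adj active u) Ncl) && (fun u => (pvN adj active u).any fun x => PySem.Set.contains Nv x && pvEscapes adj active Ncl x) u)) Nv := by
    rw [pv_foldl_add_filter (fun u => (!PySem.Set.contains (List.filter (fun u => !PySem.Set.issubset (pvN adj active u) Ncl) Nv) u) && (((pvN adj active u).any fun x => PySem.Set.contains (List.filter (fun u => !PySem.Set.issubset (pvN adj active u) Ncl) Nv) x) && (pvN adj active u).all fun x => PySem.Set.contains Ncl x)) Nv PySem.Set.empty hnodup hempty]
    rw [show (PySem.Set.empty : List Int) = [] from rfl, List.nil_append]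
    refine List.filter_congr fun u hu => ?_
    have hcu : PySem.Set.contains Nv u = true := (PySem.Set.contains_iff _ _).mpr hu
    simp only [pv_contains_filter, hcu, Bool.true_and, pvEscapes]
    cases h : PySem.Set.issubset (pvN adj active u) Ncl
    · simp
    · have hall : ((pvN adj active u).all fun x => PySem.Set.contains Ncl x) = true := by
        rw [← pv_subset_all]; exact h
      rw [hall]
      simp
  rw [hO2]
  -- A's O3 set subtraction is the remaining filter
  have hO3 : PySem.Set.diff (PySem.Set.diff Nv (List.filter (fun u => !PySem.Set.issubset (pvN adj active u) Ncl) Nv)) (List.filter (fun u => (!(!PySem.Set.issubset (pvN adj active u) Ncl) && (fun u => (pvN adj active u).any fun x => PySem.Set.contains Nv x && pvEscapes adj active Ncl x) u)) Nv) = List.filter (fun u => (!(!PySem.Set.issubset (pvN adj active u) Ncl) && !(fun u => (pvN adj active u).any fun x => PySem.Set.contains Nv x && pvEscapes adj active Ncl x) u)) Nv := by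
    show (Nv.filter (fun x => !PySem.Set.contains (List.filter (fun u => !PySem.Set.issubset (pvN adj active u) Ncl) Nv) x)).filter (fun x => !PySem.Set.contains (List.filter (fun u => (!(!PySem.Set.issubset (pvN adj active u) Ncl) && (fun u => (pvN adj active u).any fun x => PySem.Set.contains Nv x && pvEscapes adj active Ncl x) u)) Nv) x) = _
    rw [List.filter_filter]
    refine List.filter_congr fun u hu => ?_
    have hcu : PySem.Set.contains Nv u = true := (PySem.Set.contains_iff _ _).mpr hu
    simp only [pv_contains_filter, hcu, Bool.true_and]
    cases h1 : PySem.Set.issubset (pvN adj active u) Ncl <;>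
      cases h2 : (pvN adj active u).any fun x => PySem.Set.contains Nv x && pvEscapes adj active Ncl x <;>
        simp
  rw [hO3]
  -- B's single classifying loop builds exactly these three filters
  rw [pv_foldl_threeway (fun u => !PySem.Set.issubset (pvN adj active u) Ncl)
        (fun u => (pvN adj active u).any fun x => PySem.Set.contains Nv x && pvEscapes adj active Ncl x)
        Nv PySem.Set.empty PySem.Set.empty PySem.Set.empty hnodup hempty hempty hempty]
  rw [show (PySem.Set.empty : List Int) = [] from rfl]
  simp only [List.nil_append]
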